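-- pv_equiv track=rewrite | github.com/nnttvy/BigData-Project | CODE/GR5-BDA_Demo/demo/app.py | remove_non_english
-- ===== SOURCE A (Python) =====
-- def is_english(word):
--     for char in word:
--         if not ('a' <= char.lower() <= 'z'):
--             return False
--     return True
--
-- def remove_non_english(text):
--     words = text.split()
--     output = []
--     current_word = ''
--     for word in words:
--         if is_english(word):
--             current_word += word + ' '
--         elif current_word:
--             output.append(current_word.strip())
--             current_word = ''
--     if current_word:
--         output.append(current_word.strip())
--     return ' '.join(output)
-- ===== SOURCE B (Python) =====
-- def is_english(word):
--     for char in word: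
--         if not ('a' <= char.lower() <= 'z'):
--             return False
--     return True
--
-- def remove_non_english(text):
--     return ' '.join(w for w in text.split() if is_english(w))
-- ===== Notes on version B (the rewrite author's own statement) =====
-- stated objective: simpler
-- what changed: A's run-grouping state machine (current_word accumulator with strip-and-flush into output, then a join of the groups) is replaced by a direct filter-and-join of the split words, which is provably the same value because groups are re-joined by the same single space.
import Mathlib
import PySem

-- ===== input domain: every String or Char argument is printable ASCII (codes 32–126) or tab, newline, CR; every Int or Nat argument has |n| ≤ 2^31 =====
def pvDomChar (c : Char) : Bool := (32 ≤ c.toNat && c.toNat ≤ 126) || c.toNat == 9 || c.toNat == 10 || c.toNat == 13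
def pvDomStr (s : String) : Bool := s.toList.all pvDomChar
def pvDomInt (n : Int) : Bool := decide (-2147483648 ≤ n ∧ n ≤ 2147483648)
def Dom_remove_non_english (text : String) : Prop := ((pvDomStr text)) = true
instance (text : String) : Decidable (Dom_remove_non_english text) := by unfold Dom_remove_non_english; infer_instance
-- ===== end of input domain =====

-- B replaces A's current_word/output run-grouping state machine by a direct filter-and-join (simpler decomposition, same value).

-- ===== PORT A =====
-- shared helper: Python's is_english, char by char
def is_english : List Char → Bool
  | [] => true
  | c :: rest =>
      if ¬ ('a' ≤ PySem.Chars.lowerChar c ∧ PySem.Chars.lowerChar c ≤ 'z') then false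
      else is_english rest

-- the body of A's for-loop over words, state = (output, current_word)
def rne_step (st : List (List Char) × List Char) (word : List Char) : List (List Char) × List Char :=
  if is_english word then (st.1, st.2 ++ word ++ [' '])
  else if st.2.isEmpty then st
  else (st.1 ++ [PySem.Chars.strip st.2], [])

-- the flush after the loop ('if current_word: output.append(current_word.strip())')
def rne_fin (st : List (List Char) × List Char) : List (List Char) :=
  if st.2.isEmpty then st.1 else st.1 ++ [PySem.Chars.strip st.2]

def remove_non_english (text : String) : String :=
  let words := PySem.Chars.split₀ text.toList
  let st := words.foldl rne_step ([], [])
  String.ofList (PySem.Chars.join [' '] (rne_fin st))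

-- ===== PORT B =====
def remove_non_english_alt (text : String) : String :=
  String.ofList (PySem.Chars.join [' '] ((PySem.Chars.split₀ text.toList).filter is_english))

-- ===== PRECONDITION & SPEC =====
def Spec_remove_non_english (text : String) (out : String) : Prop := out = remove_non_english_alt text
instance (text : String) (out : String) : Decidable (Spec_remove_non_english text out) := by unfold Spec_remove_non_english; infer_instance

-- ===== CLAIM (what is proved, stated in full; the proofs are below) =====
def Claim_equal_remove_non_english : Prop := ∀ (text : String), Dom_remove_non_english text → Spec_remove_non_english text (remove_non_english text)

-- ===== LEMMAS AND PROOFS =====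

-- a "good" word: nonempty and containing no whitespace (what text.split() produces)
def GoodWord (w : List Char) : Prop := w ≠ [] ∧ ∀ c ∈ w, PySem.Chars.isspace c = false

-- current_word after accumulating the run g of english words: each word followed by one space
def trail (g : List (List Char)) : List Char := g.flatMap (fun w => w ++ [' '])

lemma split₀_go_good (s cur : List Char) (acc : List (List Char))
    (hcur : ∀ c ∈ cur, PySem.Chars.isspace c = false)
    (hacc : ∀ w ∈ acc, GoodWord w) :
    ∀ w ∈ PySem.Chars.split₀.go s cur acc, GoodWord w := by
  induction s generalizing cur acc with
  | nil =>
      intro w hw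
      rw [PySem.Chars.split₀.go.eq_def] at hw
      simp only [] at hw
      split at hw
      · exact hacc w (by simpa using hw)
      · rcases (by simpa using hw : w ∈ acc ∨ w = cur.reverse) with h | h
        · exact hacc w h
        · subst h
          refine ⟨by simpa using ‹¬ cur.isEmpty = true›, ?_⟩
          intro c hc
          exact hcur c (by simpa using hc)
  | cons c rest ih =>
      intro w hw
      rw [PySem.Chars.split₀.go.eq_def] at hw
      simp only [] at hw
      by_cases hc : PySem.Chars.isspace c = true
      · rw [if_pos hc] at hw
        split at hw
        · exact ih [] acc (by simp) hacc w hw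
        · refine ih [] (cur.reverse :: acc) (by simp) ?_ w hw
          intro v hv
          rcases List.mem_cons.mp hv with h | h
          · subst h
            refine ⟨by simpa using ‹¬ cur.isEmpty = true›, ?_⟩
            intro x hx
            exact hcur x (by simpa using hx)
          · exact hacc v h
      · rw [if_neg hc] at hw
        refine ih (c :: cur) acc ?_ hacc w hw
        intro x hx
        rcases List.mem_cons.mp hx with h | h
        · subst h; simpa using hc
        · exact hcur x h

lemma split₀_good (s : List Char) : ∀ w ∈ PySem.Chars.split₀ s, GoodWord w := by
  intro w hw
  exact split₀_go_good s [] [] (by simp) (by simp) w hw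

lemma shift_space (g : List (List Char)) :
    ' ' :: g.flatMap (fun w => w ++ [' ']) = g.flatMap (fun w => ' ' :: w) ++ [' '] := by
  induction g with
  | nil => rfl
  | cons w g' ih => simp only [List.flatMap_cons, List.cons_append, List.append_assoc]
                    rw [← ih]
                    simp

lemma ic_two (a b : List Char) (l : List (List Char)) :
    [' '].intercalate (a :: b :: l) = a ++ [' '] ++ [' '].intercalate (b :: l) := by
  simp [List.intercalate, List.intersperse]

lemma ic_cons (x : List Char) (xs : List (List Char)) :
    [' '].intercalate (x :: xs) = x ++ xs.flatMap (fun y => ' ' :: y) := by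
  induction xs generalizing x with
  | nil => simp [List.intercalate]
  | cons y ys ih =>
      rw [ic_two, ih y]
      simp

lemma trail_eq (g : List (List Char)) (h : g ≠ []) :
    trail g = [' '].intercalate g ++ [' '] := by
  cases g with
  | nil => exact absurd rfl h
  | cons w g' =>
      rw [ic_cons]
      simp only [trail, List.flatMap_cons, List.append_assoc]
      rw [← shift_space g']
      simp

lemma trail_isEmpty (g : List (List Char)) (hg : ∀ w ∈ g, GoodWord w) :
    (trail g).isEmpty = g.isEmpty := by
  cases g with
  | nil => rfl
  | cons w g' =>
      obtain ⟨hne, -⟩ := hg w (List.mem_cons_self ..)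
      cases w with
      | nil => exact absurd rfl hne
      | cons c w' => simp [trail]

lemma last_nonspace (g : List (List Char)) (hg : ∀ w ∈ g, GoodWord w) (hne : g ≠ []) :
    ∃ c rest, ([' '].intercalate g).reverse = c :: rest ∧ PySem.Chars.isspace c = false := by
  induction g with
  | nil => exact absurd rfl hne
  | cons w g' ih =>
      obtain ⟨hwne, hwns⟩ := hg w (List.mem_cons_self ..)
      cases hg' : g' with
      | nil =>
          subst hg'
          have : [' '].intercalate [w] = w := by simp [List.intercalate]
          rw [this]
          cases hr : w.reverse with
          | nil => simp at hr; exact absurd hr hwne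
          | cons c rest =>
              refine ⟨c, rest, rfl, hwns c ?_⟩
              rw [← List.mem_reverse, hr]; exact List.mem_cons_self ..
      | cons v g'' =>
          obtain ⟨c, rest, hcr, hcs⟩ := ih (fun x hx => hg x (List.mem_cons_of_mem _ hx)) (by simp [hg'])
          subst hg'
          rw [ic_two]
          refine ⟨c, rest ++ ' ' :: w.reverse, ?_, hcs⟩
          simp [hcr]

lemma strip_trail (g : List (List Char)) (hg : ∀ w ∈ g, GoodWord w) (hne : g ≠ []) :
    PySem.Chars.strip (trail g) = [' '].intercalate g := by
  obtain ⟨c2, rest, hcr, hcs⟩ := last_nonspace g hg hne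
  cases g with
  | nil => exact absurd rfl hne
  | cons w g' =>
      obtain ⟨hwne, hwns⟩ := hg w (List.mem_cons_self ..)
      cases w with
      | nil => exact absurd rfl hwne
      | cons a w' =>
          have ha : PySem.Chars.isspace a = false := hwns a (List.mem_cons_self ..)
          have hl : PySem.Chars.lstrip (trail ((a :: w') :: g')) = trail ((a :: w') :: g') := by
            simp [PySem.Chars.lstrip, trail, ha]
          have hsp : PySem.Chars.isspace ' ' = true := by decide
          have h2 := congrArg List.reverse hcr
          simp only [List.reverse_reverse] at h2
          unfold PySem.Chars.strip
          rw [hl]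
          unfold PySem.Chars.rstrip
          rw [trail_eq _ hne, List.reverse_append, hcr, h2]
          simp [hsp, hcs]

lemma merge (out rest g : List (List Char)) (hne : g ≠ []) :
    [' '].intercalate (out ++ ([' '].intercalate g) :: rest)
      = [' '].intercalate (out ++ (g ++ rest)) := by
  cases g with
  | nil => exact absurd rfl hne
  | cons w g' =>
      cases out with
      | nil => simp [ic_cons, List.flatMap_append]
      | cons o out' =>
          simp [ic_cons, List.flatMap_append, List.append_assoc]

lemma loop_inv (ws : List (List Char)) (out g : List (List Char))
    (hws : ∀ w ∈ ws, GoodWord w) (hg : ∀ w ∈ g, GoodWord w) :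
    [' '].intercalate (rne_fin (ws.foldl rne_step (out, trail g)))
      = [' '].intercalate (out ++ g ++ ws.filter is_english) := by
  induction ws generalizing out g with
  | nil =>
      simp only [List.foldl_nil, List.filter_nil, List.append_nil]
      unfold rne_fin
      rw [trail_isEmpty g hg]
      cases g with
      | nil => simp
      | cons w g' =>
          rw [if_neg (by simp)]
          rw [strip_trail _ hg (by simp)]
          have := merge out [] (w :: g') (by simp)
          simpa using this
  | cons w ws ih =>
      simp only [List.foldl_cons]
      by_cases hE : is_english w = true
      · have hstep : rne_step (out, trail g) w = (out, trail (g ++ [w])) := by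
          simp [rne_step, hE, trail, List.flatMap_append, List.append_assoc]
        rw [hstep, ih out (g ++ [w]) (fun v hv => hws v (List.mem_cons_of_mem _ hv))
          (by intro v hv
              rcases List.mem_append.mp hv with h | h
              · exact hg v h
              · simp at h; subst h; exact hws _ (List.mem_cons_self ..))]
        simp [hE, List.append_assoc]
      · cases g with
        | nil =>
            have hstep : rne_step (out, trail []) w = (out, trail []) := by
              simp [rne_step, hE, trail]
            rw [hstep, ih out [] (fun v hv => hws v (List.mem_cons_of_mem _ hv)) (by simp)]
            simp [hE]
        | cons u g' =>
            have hstep : rne_step (out, trail (u :: g')) w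
                = (out ++ [PySem.Chars.strip (trail (u :: g'))], trail []) := by
              simp [rne_step, hE, trail]
            rw [hstep, ih (out ++ [PySem.Chars.strip (trail (u :: g'))]) []
              (fun v hv => hws v (List.mem_cons_of_mem _ hv)) (by simp)]
            rw [strip_trail _ hg (by simp)]
            have hm := merge out (ws.filter is_english) (u :: g') (by simp)
            simp only [List.filter_cons, hE, Bool.false_eq_true, if_false, List.append_assoc,
              List.append_nil, List.singleton_append] at hm ⊢
            exact hm

-- ===== VERDICT (by name: the statement is the Claim_ definition above) =====
theorem remove_non_english_spec : Claim_equal_remove_non_english := by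
  intro text _
  show _ = _
  unfold remove_non_english remove_non_english_alt
  have h := loop_inv (PySem.Chars.split₀ text.toList) [] [] (split₀_good _) (by intro w hw; cases hw)
  simp only [trail, List.flatMap_nil] at h
  simp [PySem.Chars.join, h]
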